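-- pv_equiv track=rewrite | github.com/rodolfodilma2-svg/dilma | srodolfobarbosa/sandbox/runner.py | _count_failed_tests
-- ===== SOURCE A (Python) =====
-- def _count_failed_tests(output: str) -> int:
--     """Cuenta tests fallidos en output de pytest."""
--     try:
--         for line in output.split("\n"):
--             if "failed" in line:
--                 parts = line.split()
--                 for i, part in enumerate(parts):
--                     if "failed" in part and i > 0:
--                         return int(parts[i-1])
--     except:
--         pass
--     return 0
-- ===== SOURCE B (Python) =====
-- def _count_failed_tests(output: str) -> int:
--     """Cuenta tests fallidos en output de pytest."""
--     prev = None  # previous completed token on the current line, if any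
--     cur = ""     # token currently being read
--     for ch in output + "\n":  # trailing newline flushes the final token
--         if ch.isspace():
--             if cur:
--                 if "failed" in cur and prev is not None:
--                     try:
--                         return int(prev)
--                     except ValueError:
--                         return 0
--                 prev = cur
--                 cur = ""
--             if ch == "\n":
--                 prev = None
--         else:
--             cur += ch
--     return 0
-- ===== Notes on version B (the rewrite author's own statement) =====
-- stated objective: alternative
-- what changed: Replaces A's line-splitting plus per-line whitespace-splitting plus enumerate token scan (with its whole-function bare except) with a single character-level state-machine pass that never splits: it tracks the previous and current token while streaming characters, resets the previous-token state at line breaks, and on completing a token containing the marker word returns the previous token parsed as an integer, with a parse failure mapped to 0.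
import Mathlib
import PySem

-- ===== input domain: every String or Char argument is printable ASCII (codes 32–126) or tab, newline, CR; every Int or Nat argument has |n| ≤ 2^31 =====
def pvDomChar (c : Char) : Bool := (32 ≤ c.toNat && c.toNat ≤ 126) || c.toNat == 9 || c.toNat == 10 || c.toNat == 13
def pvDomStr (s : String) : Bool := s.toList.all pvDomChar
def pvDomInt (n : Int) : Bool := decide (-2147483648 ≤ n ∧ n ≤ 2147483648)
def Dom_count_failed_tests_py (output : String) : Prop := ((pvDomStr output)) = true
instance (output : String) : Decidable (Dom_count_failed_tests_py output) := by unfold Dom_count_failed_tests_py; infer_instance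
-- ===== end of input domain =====

-- B replaces A's split("\n")/split()/enumerate token scan with a single character-level
-- state-machine pass (previous token + current token, reset at newlines) — an alternative
-- algorithm of the same cost; return values proved equal on all inputs (A is total: its
-- bare except maps errors to 0).

-- ===== PORT A =====
-- inner loop: `for i, part in enumerate(parts): if "failed" in part and i > 0: return int(parts[i-1])`
-- (the surrounding bare `except: pass` + `return 0` maps an int() ValueError — and any IndexError — to 0)
def pvInnerA (parts : List String) : List (Int × String) → Option Int
  | [] => none
  | (i, part) :: rest =>
    if PySem.Str.isIn "failed" part = true ∧ i > 0 then
      some (match PySem.List.pyGet? parts (i - 1) with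
            | some prev => (PySem.Int.ofStr? prev).getD 0
            | none => 0)
    else pvInnerA parts rest

-- outer loop: `for line in output.split("\n"): if "failed" in line: …`
def pvOuterA : List String → Option Int
  | [] => none
  | line :: rest =>
    if PySem.Str.isIn "failed" line = true then
      match pvInnerA (PySem.Str.split₀ line) (PySem.List.enumerate (PySem.Str.split₀ line)) with
      | some v => some v
      | none => pvOuterA rest
    else pvOuterA rest

def count_failed_tests_py (output : String) : Int :=
  (pvOuterA ((PySem.Str.split? output "\n").getD [])).getD 0

-- ===== PORT B =====
-- the scanner loop: `for ch in output + "\n": …` with state (prev, cur);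
-- a hit returns int(prev) with ValueError mapped to 0 (`try/except`)
def scanB : List Char → Option (List Char) → List Char → Int
  | [], _, _ => 0                                           -- final `return 0`
  | c :: rest, prev, cur =>
    if PySem.Chars.isspace c = true then                    -- `if ch.isspace():`
      if cur.isEmpty then
        scanB rest (if c = '\n' then none else prev) cur
      else
        if PySem.Chars.isIn ['f', 'a', 'i', 'l', 'e', 'd'] cur = true ∧ prev.isSome then
          (PySem.Int.ofChars? (prev.getD [])).getD 0        -- `return int(prev)` / except → 0
        else scanB rest (if c = '\n' then none else some cur) []
    else scanB rest prev (cur ++ [c])                       -- `cur += ch`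

def count_failed_tests_py_alt (output : String) : Int :=
  scanB (output.toList ++ ['\n']) none []

-- ===== PRECONDITION & SPEC =====
def Spec_count_failed_tests_py (output : String) (out : Int) : Prop := out = count_failed_tests_py_alt output
instance (output : String) (out : Int) : Decidable (Spec_count_failed_tests_py output out) := by unfold Spec_count_failed_tests_py; infer_instance

-- ===== CLAIM (what is proved, stated in full; the proofs are below) =====
def Claim_equal_count_failed_tests_py : Prop := ∀ (output : String), Dom_count_failed_tests_py output → Spec_count_failed_tests_py output (count_failed_tests_py output)

-- ===== LEMMAS AND PROOFS =====

-- string-level intermediates for A's reduction: first (prev, tok) adjacent pair with "failed" in tok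
def pvPairs : List String → Option String
  | a :: b :: rest => if PySem.Str.isIn "failed" b = true then some a else pvPairs (b :: rest)
  | _ => none

def pvFirstHit : List String → Option String
  | [] => none
  | line :: rest =>
    match pvPairs (PySem.Str.split₀ line) with
    | some prev => some prev
    | none => pvFirstHit rest

-- char-level counterparts
def pvPairsC : List (List Char) → Option (List Char)
  | a :: b :: rest => if PySem.Chars.isIn ['f', 'a', 'i', 'l', 'e', 'd'] b = true then some a else pvPairsC (b :: rest)
  | _ => none

def firstHitC : List (List Char) → Option (List Char)
  | [] => none
  | L :: r => (pvPairsC (PySem.Chars.split₀ L)).or (firstHitC r)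

-- the line structure of a char list (what splitOn · ['\n'] computes)
def splitNL : List Char → List (List Char)
  | [] => [[]]
  | c :: r => if c = '\n' then [] :: splitNL r else (splitNL r).modifyHead (c :: ·)

def optConsC : Option (List Char) → List (List Char) → List (List Char)
  | some p, ts => p :: ts
  | none, ts => ts

def ansOf : Option (List Char) → Int
  | some p => (PySem.Int.ofChars? p).getD 0
  | none => 0

-- token-level meaning of scanB's state on the remaining input
def specScan (prev : Option (List Char)) (cur : List Char) (s : List Char) : Option (List Char) :=
  match splitNL s with
  | [] => none
  | L :: r => (pvPairsC (optConsC prev (PySem.Chars.split₀ (cur ++ L)))).or (firstHitC r)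

-- ----- A-side reduction (split/enumerate scan = pvFirstHit) -----

lemma pv_go_infix (s : List Char) : ∀ (cur : List Char) (acc : List (List Char)) (w : List Char),
    w ∈ PySem.Chars.split₀.go s cur acc → w ∈ acc ∨ w <:+: (cur.reverse ++ s) := by
  induction s with
  | nil =>
    intro cur acc w h
    rw [PySem.Chars.split₀.go] at h
    split_ifs at h with hc
    · exact Or.inl (List.mem_reverse.mp h)
    · rcases List.mem_cons.mp (List.mem_reverse.mp h) with h | h
      · exact Or.inr ⟨[], [], by simp [h]⟩
      · exact Or.inl h
  | cons c rest ih =>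
    intro cur acc w h
    rw [PySem.Chars.split₀.go] at h
    split_ifs at h with hsp hc
    · rcases ih [] acc w h with h | h
      · exact Or.inl h
      · exact Or.inr (h.trans ⟨cur.reverse ++ [c], [], by simp⟩)
    · rcases ih [] (cur.reverse :: acc) w h with h | h
      · rcases List.mem_cons.mp h with h | h
        · exact Or.inr (by rw [h]; exact ⟨[], c :: rest, by simp⟩)
        · exact Or.inl h
      · exact Or.inr (h.trans ⟨cur.reverse ++ [c], [], by simp⟩)
    · rcases ih (c :: cur) acc w h with h | h
      · exact Or.inl h
      · exact Or.inr (by simpa using h)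

lemma pv_split₀_infix (s w : List Char) (h : w ∈ PySem.Chars.split₀ s) : w <:+: s := by
  rcases pv_go_infix s [] [] w h with h | h
  · simp at h
  · simpa using h

lemma pv_str_split₀_infix (line b : String) (h : b ∈ PySem.Str.split₀ line) :
    b.toList <:+: line.toList := by
  rcases List.mem_map.mp h with ⟨w, hw, rfl⟩
  rw [String.toList_ofList]
  exact pv_split₀_infix _ _ hw

lemma pvPairs_some_mem (ws : List String) (a : String) (h : pvPairs ws = some a) :
    ∃ b ∈ ws, PySem.Str.isIn "failed" b = true := by
  induction ws with
  | nil => simp [pvPairs] at h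
  | cons x t ih =>
    match t, h with
    | [], h => simp [pvPairs] at h
    | b :: rest, h =>
      rw [pvPairs] at h
      split_ifs at h with hb
      · exact ⟨b, by simp, hb⟩
      · rcases ih h with ⟨b', hb', hf⟩
        exact ⟨b', by simp [List.mem_cons] at hb' ⊢; tauto, hf⟩

lemma pvPairs_none (line : String) (h : ¬ PySem.Str.isIn "failed" line = true) :
    pvPairs (PySem.Str.split₀ line) = none := by
  cases hp : pvPairs (PySem.Str.split₀ line) with
  | none => rfl
  | some a =>
    exfalso
    rcases pvPairs_some_mem _ _ hp with ⟨b, hb, hf⟩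
    have h1 : ("failed" : String).toList <:+: b.toList := (PySem.Str.isIn_iff_infix _ _).mp hf
    have h2 := pv_str_split₀_infix line b hb
    exact h ((PySem.Str.isIn_iff_infix _ _).mpr (h1.trans h2))

lemma pvInner_from : ∀ (tail pre : List String) (a : String),
    pvInnerA (pre ++ a :: tail) (PySem.List.enumerate tail ((pre.length : Int) + 1)) =
      (pvPairs (a :: tail)).map (fun p => (PySem.Int.ofStr? p).getD 0) := by
  intro tail
  induction tail with
  | nil => intro pre a; simp [PySem.List.enumerate, pvInnerA, pvPairs]
  | cons t ts ih =>
    intro pre a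
    rw [PySem.List.enumerate_cons, pvInnerA, pvPairs]
    by_cases hf : PySem.Str.isIn "failed" t = true
    · have hpos : ((pre.length : Int) + 1) > 0 := by positivity
      rw [if_pos ⟨hf, hpos⟩, if_pos hf]
      have hidx : (pre.length : Int) + 1 - 1 = ((pre.length : Nat) : Int) := by ring
      rw [hidx, PySem.List.pyGet?_natCast]
      simp
    · rw [if_neg (by tauto), if_neg hf]
      have := ih (pre ++ [a]) t
      simpa [show pre ++ [a] ++ t :: ts = pre ++ a :: t :: ts by simp] using this

lemma pvInner_eq (parts : List String) :
    pvInnerA parts (PySem.List.enumerate parts) =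
      (pvPairs parts).map (fun p => (PySem.Int.ofStr? p).getD 0) := by
  cases parts with
  | nil => simp [PySem.List.enumerate, pvInnerA, pvPairs]
  | cons p rest =>
    rw [show PySem.List.enumerate (p :: rest) = PySem.List.enumerate (p :: rest) 0 from rfl,
      PySem.List.enumerate_cons, pvInnerA]
    rw [if_neg (by simp)]
    have := pvInner_from rest [] p
    simpa using this

lemma pvOuter_eq (ls : List String) :
    pvOuterA ls = (pvFirstHit ls).map (fun p => (PySem.Int.ofStr? p).getD 0) := by
  induction ls with
  | nil => simp [pvOuterA, pvFirstHit]
  | cons line rest ih =>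
    rw [pvOuterA, pvFirstHit]
    by_cases hl : PySem.Str.isIn "failed" line = true
    · rw [if_pos hl, pvInner_eq]
      cases pvPairs (PySem.Str.split₀ line) <;> simp [ih]
    · rw [if_neg hl, pvPairs_none line hl]
      simpa using ih

-- ----- string ↔ char bridges -----

lemma pvPairs_map : ∀ (ts : List (List Char)),
    pvPairs (ts.map String.ofList) = (pvPairsC ts).map String.ofList := by
  intro ts
  match ts with
  | [] => simp [pvPairs, pvPairsC]
  | [a] => simp [pvPairs, pvPairsC]
  | a :: b :: rest =>
    rw [List.map_cons, List.map_cons, pvPairs, pvPairsC]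
    have hb : PySem.Str.isIn "failed" (String.ofList b) = PySem.Chars.isIn ['f', 'a', 'i', 'l', 'e', 'd'] b := by
      simp [PySem.Str.isIn_eq]
    rw [hb]
    split_ifs with h
    · rfl
    · exact pvPairs_map (b :: rest)

lemma pvFirstHit_map : ∀ (Ls : List (List Char)),
    pvFirstHit (Ls.map String.ofList) = (firstHitC Ls).map String.ofList := by
  intro Ls
  induction Ls with
  | nil => simp [pvFirstHit, firstHitC]
  | cons L r ih =>
    rw [List.map_cons, pvFirstHit, firstHitC]
    have hs : PySem.Str.split₀ (String.ofList L) = (PySem.Chars.split₀ L).map String.ofList := by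
      simp [PySem.Str.split₀]
    rw [hs, pvPairs_map]
    cases pvPairsC (PySem.Chars.split₀ L) <;> simp [ih, Option.or]

-- ----- splitOn · ['\n'] = splitNL -----

lemma splitNL_ne_nil (s : List Char) : splitNL s ≠ [] := by
  induction s with
  | nil => simp [splitNL]
  | cons c r ih =>
    rw [splitNL]
    split_ifs
    · simp
    · cases h : splitNL r with
      | nil => exact absurd h ih
      | cons a t => simp

lemma modifyHead_nil_append (L : List (List Char)) : L.modifyHead (fun x => [] ++ x) = L := by
  cases L <;> simp

lemma splitOn_go_nl : ∀ (fuel : Nat) (l cur : List Char) (acc : List (List Char)), l.length < fuel →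
    PySem.Chars.splitOn.go ['\n'] fuel l cur acc =
      acc.reverse ++ (splitNL l).modifyHead (fun x => cur.reverse ++ x) := by
  intro fuel
  induction fuel with
  | zero => intro l cur acc h; omega
  | succ fuel ih =>
    intro l cur acc h
    cases l with
    | nil => rw [PySem.Chars.splitOn.go] <;> simp [splitNL]
    | cons c rest =>
      rw [PySem.Chars.splitOn.go]
      by_cases hc : c = '\n'
      · subst hc
        rw [if_pos (by simp [List.isPrefixOf])]
        rw [ih _ _ _ (by simpa using Nat.lt_of_succ_lt_succ h)]
        rw [splitNL, if_pos rfl]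
        cases hsp : splitNL rest with
        | nil => exact absurd hsp (splitNL_ne_nil rest)
        | cons a t => simp [hsp]
      · rw [if_neg (by simp [List.isPrefixOf]; intro h'; exact hc h'.symm)]
        rw [ih _ _ _ (by simpa using Nat.lt_of_succ_lt_succ h)]
        rw [splitNL, if_neg hc]
        cases hsp : splitNL rest with
        | nil => exact absurd hsp (splitNL_ne_nil rest)
        | cons a t => simp

lemma splitOn_nl (s : List Char) : PySem.Chars.splitOn s ['\n'] = splitNL s := by
  rw [PySem.Chars.splitOn, splitOn_go_nl (s.length + 1) s [] [] (by omega)]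
  simpa using modifyHead_nil_append (splitNL s)

-- ----- split₀ structure lemmas -----

lemma split₀_go_acc : ∀ (s cur : List Char) (acc : List (List Char)),
    PySem.Chars.split₀.go s cur acc = acc.reverse ++ PySem.Chars.split₀.go s cur [] := by
  intro s
  induction s with
  | nil =>
    intro cur acc
    rw [PySem.Chars.split₀.go, PySem.Chars.split₀.go]
    split_ifs <;> simp
  | cons c rest ih =>
    intro cur acc
    rw [PySem.Chars.split₀.go]
    conv_rhs => rw [PySem.Chars.split₀.go]
    split_ifs with hsp hc
    · exact ih [] acc
    · rw [ih [] (cur.reverse :: acc), ih [] [cur.reverse]]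
      simp
    · exact ih (c :: cur) acc

lemma split₀_go_shift : ∀ (tok : List Char), (∀ c ∈ tok, PySem.Chars.isspace c = false) →
    ∀ (L pre : List Char) (acc : List (List Char)),
    PySem.Chars.split₀.go (tok ++ L) pre acc = PySem.Chars.split₀.go L (tok.reverse ++ pre) acc := by
  intro tok
  induction tok with
  | nil => intro _ L pre acc; simp
  | cons c cs ih =>
    intro h L pre acc
    rw [List.cons_append, PySem.Chars.split₀.go]
    rw [if_neg (by simp [h c (by simp)])]
    rw [ih (fun x hx => h x (by simp [hx])) L (c :: pre) acc]
    simp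

lemma split₀_tok_nil (tok : List Char) (hne : tok ≠ [])
    (h : ∀ c ∈ tok, PySem.Chars.isspace c = false) :
    PySem.Chars.split₀ tok = [tok] := by
  have := split₀_go_shift tok h [] [] []
  rw [PySem.Chars.split₀, show tok = tok ++ [] by simp, this]
  rw [PySem.Chars.split₀.go]
  rw [if_neg (by simpa using hne)]
  simp

lemma split₀_space (c : Char) (hc : PySem.Chars.isspace c = true) (L : List Char) :
    PySem.Chars.split₀ (c :: L) = PySem.Chars.split₀ L := by
  rw [PySem.Chars.split₀, PySem.Chars.split₀.go, if_pos hc]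
  simp [PySem.Chars.split₀]

lemma split₀_tok_cons (tok : List Char) (hne : tok ≠ [])
    (h : ∀ c ∈ tok, PySem.Chars.isspace c = false)
    (c : Char) (hc : PySem.Chars.isspace c = true) (L : List Char) :
    PySem.Chars.split₀ (tok ++ c :: L) = tok :: PySem.Chars.split₀ L := by
  rw [PySem.Chars.split₀, split₀_go_shift tok h (c :: L) [] []]
  rw [PySem.Chars.split₀.go, if_pos hc]
  rw [if_neg (by simpa using hne)]
  rw [split₀_go_acc]
  simp [PySem.Chars.split₀]

-- ----- the scanner invariant -----

lemma specScan_none_nil (s : List Char) : specScan none [] s = firstHitC (splitNL s) := by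
  rw [specScan]
  cases h : splitNL s with
  | nil => exact absurd h (splitNL_ne_nil s)
  | cons L r => rw [firstHitC]; rfl

lemma specScan_nil (prev : Option (List Char)) (cur : List Char) :
    specScan prev cur [] = pvPairsC (optConsC prev (PySem.Chars.split₀ cur)) := by
  simp [specScan, splitNL, firstHitC]

lemma specScan_cons_nl (s' : List Char) (prev : Option (List Char)) (cur : List Char) :
    specScan prev cur ('\n' :: s') =
      (pvPairsC (optConsC prev (PySem.Chars.split₀ cur))).or (firstHitC (splitNL s')) := by
  rw [specScan, splitNL, if_pos rfl]
  simp

lemma specScan_cons (c : Char) (hc : c ≠ '\n') (s' L' : List Char) (r' : List (List Char))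
    (hsplit : splitNL s' = L' :: r') (prev : Option (List Char)) (cur : List Char) :
    specScan prev cur (c :: s') =
      (pvPairsC (optConsC prev (PySem.Chars.split₀ (cur ++ c :: L')))).or (firstHitC r') := by
  rw [specScan, splitNL, if_neg hc, hsplit]
  simp

lemma scan_eq : ∀ (s : List Char) (prev : Option (List Char)) (cur : List Char),
    (∀ c ∈ cur, PySem.Chars.isspace c = false) →
    scanB (s ++ ['\n']) prev cur = ansOf (specScan prev cur s) := by
  intro s
  induction s with
  | nil =>
    intro prev cur hcur
    rw [List.nil_append, scanB, if_pos (by decide), specScan_nil]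
    by_cases hc : cur = []
    · subst hc
      simp only [List.isEmpty_nil, if_true]
      rw [scanB]
      cases prev <;>
        simp [optConsC, PySem.Chars.split₀, PySem.Chars.split₀.go, pvPairsC, ansOf]
    · rw [if_neg (by simpa using hc), split₀_tok_nil cur hc hcur]
      cases prev with
      | none => rw [scanB]; simp [optConsC, pvPairsC, ansOf]
      | some p =>
        by_cases hf : PySem.Chars.isIn ['f', 'a', 'i', 'l', 'e', 'd'] cur = true
        · simp [hf, optConsC, pvPairsC, ansOf]
        · rw [if_neg (by simp [hf]), scanB]
          simp [optConsC, pvPairsC, hf, ansOf]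
  | cons c s' ih =>
    intro prev cur hcur
    rw [List.cons_append, scanB]
    cases hsplit : splitNL s' with
    | nil => exact absurd hsplit (splitNL_ne_nil s')
    | cons L' r' =>
    by_cases hspace : PySem.Chars.isspace c = true
    · rw [if_pos hspace]
      by_cases hc : c = '\n'
      · subst hc
        rw [specScan_cons_nl]
        by_cases hce : cur = []
        · subst hce
          simp only [List.isEmpty_nil, if_true]
          rw [ih none [] (by simp), specScan_none_nil]
          cases prev <;>
            simp [optConsC, PySem.Chars.split₀, PySem.Chars.split₀.go, pvPairsC]
        · rw [if_neg (by simpa using hce), split₀_tok_nil cur hce hcur]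
          cases prev with
          | none =>
            rw [if_neg (by simp), if_pos rfl, ih none [] (by simp), specScan_none_nil]
            simp [optConsC, pvPairsC]
          | some p =>
            by_cases hf : PySem.Chars.isIn ['f', 'a', 'i', 'l', 'e', 'd'] cur = true
            · simp [hf, optConsC, pvPairsC, ansOf]
            · rw [if_neg (by simp [hf]), if_pos rfl, ih none [] (by simp), specScan_none_nil]
              simp [optConsC, pvPairsC, hf]
      · -- space but not newline: same line continues
        rw [specScan_cons c hc s' L' r' hsplit]
        by_cases hce : cur = []
        · subst hce
          simp only [List.isEmpty_nil, if_true, if_neg hc]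
          rw [ih prev [] (by simp), specScan, hsplit]
          simp [split₀_space c hspace]
        · rw [if_neg (by simpa using hce), split₀_tok_cons cur hce hcur c hspace L']
          cases prev with
          | none =>
            rw [if_neg (by simp), if_neg hc, ih (some cur) [] (by simp), specScan, hsplit]
            simp [optConsC]
          | some p =>
            by_cases hf : PySem.Chars.isIn ['f', 'a', 'i', 'l', 'e', 'd'] cur = true
            · simp [hf, optConsC, pvPairsC, ansOf]
            · rw [if_neg (by simp [hf]), if_neg hc, ih (some cur) [] (by simp), specScan, hsplit]
              simp [optConsC, pvPairsC, hf]
    · -- non-space char: extend the current token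
      rw [if_neg hspace]
      have hc : c ≠ '\n' := by rintro rfl; exact hspace (by decide)
      have hcur' : ∀ x ∈ cur ++ [c], PySem.Chars.isspace x = false := by
        intro x hx
        rcases List.mem_append.mp hx with hx | hx
        · exact hcur x hx
        · simp at hx; subst hx; simpa using hspace
      rw [ih prev (cur ++ [c]) hcur', specScan_cons c hc s' L' r' hsplit prev cur]
      rw [specScan, hsplit]
      rw [List.append_cons, List.append_assoc]
      simp

-- ===== VERDICT (by name: the statement is the Claim_ definition above) =====
theorem count_failed_tests_py_spec : Claim_equal_count_failed_tests_py := by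
  intro output _
  unfold Spec_count_failed_tests_py count_failed_tests_py count_failed_tests_py_alt
  have hlines : (PySem.Str.split? output "\n").getD [] = (splitNL output.toList).map String.ofList := by
    rw [PySem.Str.split?]
    simp [PySem.Chars.split?, splitOn_nl, show ("\n" : String).toList = ['\n'] from rfl]
  rw [hlines, pvOuter_eq, pvFirstHit_map]
  rw [scan_eq output.toList none [] (by simp), specScan_none_nil]
  cases firstHitC (splitNL output.toList) <;> simp [ansOf, PySem.Int.ofStr?]
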